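-- pv_equiv track=rewrite | github.com/YiChen9169/math | linear interpolation.py | find_closest_values
-- ===== SOURCE A (Python) =====
-- def find_closest_values(target_value, values):
--     values = sorted(values)  # 对值进行排序
--     closest_values = []
--
--     for i in range(len(values) - 1):
--         if values[i] <= target_value <= values[i + 1]:
--             closest_values = [values[i], values[i + 1]]
--             break
--
--     return closest_values
-- ===== SOURCE B (Python) =====
-- def find_closest_values(target_value, values):
--     values = sorted(values)
--     # binary search for the leftmost index whose element is >= target_value
--     lo, hi = 0, len(values)
--     while lo < hi:
--         mid = (lo + hi) // 2
--         if values[mid] < target_value: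
--             lo = mid + 1
--         else:
--             hi = mid
--     if 0 < lo < len(values):
--         return [values[lo - 1], values[lo]]
--     if lo == 0 and len(values) > 1 and values[0] == target_value:
--         return [values[0], values[1]]
--     return []
-- ===== Notes on version B (the rewrite author's own statement) =====
-- stated objective: alternative
-- what changed: Replaces the linear scan over adjacent pairs (with break) by a hand-written binary search for the leftmost element >= target, then reads the bracketing pair off directly by index.
import Mathlib
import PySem

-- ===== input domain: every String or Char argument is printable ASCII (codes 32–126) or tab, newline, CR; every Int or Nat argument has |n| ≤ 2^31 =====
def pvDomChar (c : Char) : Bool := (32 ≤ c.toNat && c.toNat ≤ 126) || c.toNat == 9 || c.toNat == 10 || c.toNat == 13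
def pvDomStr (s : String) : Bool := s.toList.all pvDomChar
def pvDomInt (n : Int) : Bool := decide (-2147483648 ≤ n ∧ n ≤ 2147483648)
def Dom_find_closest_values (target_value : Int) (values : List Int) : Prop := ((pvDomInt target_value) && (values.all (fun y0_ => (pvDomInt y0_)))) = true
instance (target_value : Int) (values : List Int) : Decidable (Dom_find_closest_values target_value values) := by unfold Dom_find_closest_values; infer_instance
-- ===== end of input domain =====

-- B replaces A's linear scan over adjacent pairs by a hand-written binary search for the
-- leftmost element ≥ target (objective: alternative algorithm, same overall sort-dominated cost).

-- ===== PORT A =====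
-- A's loop 'for i in range(len(values)-1): if values[i] <= t <= values[i+1]: …; break'
-- as structural recursion on the index i (getD is exact: i and i+1 are in range at every probe).
def pvAGo (t : Int) (vs : List Int) (i : Nat) : List Int :=
  if _h : i + 1 < vs.length then
    if vs.getD i 0 ≤ t ∧ t ≤ vs.getD (i + 1) 0 then [vs.getD i 0, vs.getD (i + 1) 0]
    else pvAGo t vs (i + 1)
  else []
termination_by vs.length - i

def find_closest_values (target_value : Int) (values : List Int) : List Int :=
  pvAGo target_value (PySem.List.sorted values (fun x => x) false) 0

-- ===== PORT B =====
-- Source B's 'while lo < hi: mid = (lo+hi)//2; …' loop (getD is exact: lo ≤ mid < hi ≤ len at every probe).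
def pvBlGo (t : Int) (vs : List Int) (lo hi : Nat) : Nat :=
  if _h : lo < hi then
    let mid := (lo + hi) / 2
    if vs.getD mid 0 < t then pvBlGo t vs (mid + 1) hi else pvBlGo t vs lo mid
  else lo
termination_by hi - lo
decreasing_by all_goals omega

def find_closest_values_alt (target_value : Int) (values : List Int) : List Int :=
  let vs := PySem.List.sorted values (fun x => x) false
  let lo := pvBlGo target_value vs 0 vs.length
  if 0 < lo ∧ lo < vs.length then [vs.getD (lo - 1) 0, vs.getD lo 0]
  else if lo = 0 ∧ 1 < vs.length ∧ vs.getD 0 0 = target_value then [vs.getD 0 0, vs.getD 1 0]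
  else []

-- ===== PRECONDITION & SPEC =====
def Spec_find_closest_values (target_value : Int) (values : List Int) (out : List Int) : Prop := out = find_closest_values_alt target_value values
instance (target_value : Int) (values : List Int) (out : List Int) : Decidable (Spec_find_closest_values target_value values out) := by unfold Spec_find_closest_values; infer_instance

-- ===== CLAIM (what is proved, stated in full; the proofs are below) =====
def Claim_equal_find_closest_values : Prop := ∀ (target_value : Int) (values : List Int), Dom_find_closest_values target_value values → Spec_find_closest_values target_value values (find_closest_values target_value values)

-- ===== LEMMAS AND PROOFS =====

-- A's scan, rephrased structurally on the list.
def pvAScan (t : Int) : List Int → List Int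
  | a :: b :: rest =>
      if a ≤ t ∧ t ≤ b then [a, b] else pvAScan t (b :: rest)
  | _ => []

theorem pvAGo_cons (t : Int) (a : Int) (vs : List Int) (i : Nat) :
    pvAGo t (a :: vs) (i + 1) = pvAGo t vs i := by
  have key : ∀ k i, vs.length - i ≤ k → pvAGo t (a :: vs) (i + 1) = pvAGo t vs i := by
    intro k
    induction k with
    | zero =>
      intro i hk
      have h1 : ¬ i + 1 < vs.length := by omega
      have h2 : ¬ i + 1 + 1 < (a :: vs).length := by simp only [List.length_cons]; omega
      conv_lhs => rw [pvAGo]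
      conv_rhs => rw [pvAGo]
      rw [dif_neg h2, dif_neg h1]
    | succ k ih =>
      intro i hk
      conv_lhs => rw [pvAGo]
      conv_rhs => rw [pvAGo]
      by_cases h : i + 1 < vs.length
      · have h2 : i + 1 + 1 < (a :: vs).length := by simp only [List.length_cons]; omega
        rw [dif_pos h2, dif_pos h]
        simp only [List.getD_cons_succ]
        split_ifs with hc
        · rfl
        · exact ih (i + 1) (by omega)
      · have h2 : ¬ i + 1 + 1 < (a :: vs).length := by simp only [List.length_cons]; omega
        rw [dif_neg h2, dif_neg h]
  exact key (vs.length - i) i (le_refl _)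

theorem pvAGo_eq_scan (t : Int) (vs : List Int) : pvAGo t vs 0 = pvAScan t vs := by
  induction vs with
  | nil => rw [pvAGo]; simp [pvAScan]
  | cons a vs ih =>
    cases vs with
    | nil => rw [pvAGo]; simp [pvAScan]
    | cons b rest =>
      rw [pvAGo]
      have hlen : 0 + 1 < (a :: b :: rest).length := by simp [List.length_cons]
      simp only [hlen, dif_pos, List.getD_cons_zero, List.getD_cons_succ, pvAScan]
      split_ifs with hc
      · rfl
      · rw [pvAGo_cons]; exact ih

-- binary-search invariant: the result splits the sorted list at the first element ≥ t
theorem pvBlGo_inv (t : Int) (vs : List Int)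
    (hmono : ∀ p q : Nat, p ≤ q → q < vs.length → vs.getD p 0 ≤ vs.getD q 0)
    (lo hi : Nat) (hlohi : lo ≤ hi) (hhi : hi ≤ vs.length)
    (hlt : ∀ i : Nat, i < lo → vs.getD i 0 < t)
    (hge : ∀ i : Nat, hi ≤ i → i < vs.length → t ≤ vs.getD i 0) :
    let r := pvBlGo t vs lo hi
    r ≤ vs.length ∧ (∀ i : Nat, i < r → vs.getD i 0 < t) ∧
      (∀ i : Nat, r ≤ i → i < vs.length → t ≤ vs.getD i 0) := by
  have key : ∀ k lo hi, hi - lo ≤ k → lo ≤ hi → hi ≤ vs.length →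
      (∀ i : Nat, i < lo → vs.getD i 0 < t) →
      (∀ i : Nat, hi ≤ i → i < vs.length → t ≤ vs.getD i 0) →
      pvBlGo t vs lo hi ≤ vs.length ∧ (∀ i : Nat, i < pvBlGo t vs lo hi → vs.getD i 0 < t) ∧
        (∀ i : Nat, pvBlGo t vs lo hi ≤ i → i < vs.length → t ≤ vs.getD i 0) := by
    intro k
    induction k with
    | zero =>
      intro lo hi hk h1 h2 h3 h4
      have hnl : ¬ lo < hi := by omega
      rw [pvBlGo, dif_neg hnl]
      exact ⟨by omega, h3, fun i hri hil => h4 i (by omega) hil⟩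
    | succ k ih =>
      intro lo hi hk h1 h2 h3 h4
      by_cases h : lo < hi
      · rw [pvBlGo, dif_pos h]
        have hmlo : lo ≤ (lo + hi) / 2 := by omega
        have hmhi : (lo + hi) / 2 < hi := by omega
        by_cases hmid : vs.getD ((lo + hi) / 2) 0 < t
        all_goals simp only [hmid, if_true, if_false]
        · refine ih ((lo + hi) / 2 + 1) hi (by omega) (by omega) h2 ?_ h4
          intro i hilt
          exact lt_of_le_of_lt (hmono i ((lo + hi) / 2) (by omega) (by omega)) hmid
        · refine ih lo ((lo + hi) / 2) (by omega) (by omega) (by omega) h3 ?_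
          intro i hmi hil
          exact le_trans (not_lt.mp hmid) (hmono ((lo + hi) / 2) i hmi hil)
      · rw [pvBlGo, dif_neg h]
        exact ⟨by omega, h3, fun i hri hil => h4 i (by omega) hil⟩
  exact key (hi - lo) lo hi (le_refl _) hlohi hhi hlt hge

-- the case analysis B performs on idx, as a function
def pvCase (t : Int) (vs : List Int) (idx : Nat) : List Int :=
  if 0 < idx ∧ idx < vs.length then [vs.getD (idx - 1) 0, vs.getD idx 0]
  else if idx = 0 ∧ 1 < vs.length ∧ vs.getD 0 0 = t then [vs.getD 0 0, vs.getD 1 0]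
  else []

theorem pvScan_eq_case (t : Int) (vs : List Int)
    (hs : vs.Pairwise (· ≤ ·)) (idx : Nat) (hle : idx ≤ vs.length)
    (hlt : ∀ i : Nat, i < idx → vs.getD i 0 < t)
    (hge : ∀ i : Nat, idx ≤ i → i < vs.length → t ≤ vs.getD i 0) :
    pvAScan t vs = pvCase t vs idx := by
  induction vs generalizing idx with
  | nil =>
    have h0 : idx = 0 := by simpa using hle
    subst h0
    simp [pvAScan, pvCase]
  | cons a vs ih =>
    cases vs with
    | nil =>
      rw [pvCase, if_neg (by rintro ⟨h1, h2⟩; simp at h2; omega),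
        if_neg (by rintro ⟨-, h, -⟩; simp at h)]
      simp [pvAScan]
    | cons b rest =>
      have hab' : a ≤ b := (List.pairwise_cons.mp hs).1 b (by simp)
      have hs' : (b :: rest).Pairwise (· ≤ ·) := (List.pairwise_cons.mp hs).2
      by_cases hab : a ≤ t ∧ t ≤ b
      · have hidx : idx ≤ 1 := by
          by_contra hcon
          have hb := hlt 1 (by omega)
          simp only [List.getD_cons_succ, List.getD_cons_zero] at hb
          exact absurd hab.2 (not_le.mpr hb)
        simp only [pvAScan, if_pos hab]
        match idx, hidx with
        | 0, _ =>
          have hta : t ≤ a := by simpa using hge 0 (le_refl 0) (by simp)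
          rw [pvCase, if_neg (by rintro ⟨h, -⟩; omega),
            if_pos ⟨rfl, by simp, by simpa using le_antisymm hab.1 hta⟩]
          simp
        | 1, _ =>
          rw [pvCase, if_pos ⟨Nat.one_pos, by simp⟩]
          simp
      · simp only [pvAScan, if_neg hab]
        cases idx with
        | zero =>
          have hta : t ≤ a := by simpa using hge 0 (le_refl 0) (by simp)
          rw [ih hs' 0 (by omega) (fun i h => absurd h (by omega))
            (fun i _ hil => by simpa using hge (i + 1) (by omega) (by simp at hil ⊢; omega))]
          simp only [pvCase, List.length_cons, List.getD_cons_zero]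
          split_ifs <;> first | rfl | omega
        | succ n =>
          have hat : a < t := by simpa using hlt 0 (by omega)
          have hbt : b < t := by
            rcases not_and_or.mp hab with h | h
            · exact absurd (le_of_lt hat) h
            · exact not_le.mp h
          have hn1 : 1 ≤ n := by
            by_contra hcon
            have := hge 1 (by omega) (by simp)
            simp only [List.getD_cons_succ, List.getD_cons_zero] at this
            omega
          have hlen : n + 1 ≤ (a :: b :: rest).length := hle
          simp only [List.length_cons] at hlen
          rw [ih hs' n (by simp; omega)
            (fun i h => by simpa using hlt (i + 1) (by omega))
            (fun i hni hil => by simpa using hge (i + 1) (by omega) (by simp at hil ⊢; omega))]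
          have e1 : (a :: b :: rest).getD n 0 = (b :: rest).getD (n - 1) 0 := by
            conv_lhs => rw [show n = (n - 1) + 1 from by omega]
            rw [List.getD_cons_succ]
          have e2 : (a :: b :: rest).getD (n + 1) 0 = (b :: rest).getD n 0 := by simp
          simp only [pvCase, List.length_cons, List.getD_cons_zero]
          split_ifs <;> first
            | rfl
            | omega
            | rw [show n + 1 - 1 = n from by omega, e1, e2]

theorem pvSorted_mono (values : List Int) :
    ∀ p q : Nat, p ≤ q → q < (PySem.List.sorted values (fun x => x) false).length →
      (PySem.List.sorted values (fun x => x) false).getD p 0 ≤ (PySem.List.sorted values (fun x => x) false).getD q 0 := by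
  intro p q hpq hq
  rw [List.getD_eq_getElem _ _ (by omega), List.getD_eq_getElem _ _ hq]
  exact PySem.List.sorted_id_getElem_mono values hpq hq

-- ===== VERDICT (by name: the statement is the Claim_ definition above) =====
theorem find_closest_values_spec : Claim_equal_find_closest_values := by
  intro t values _
  unfold Spec_find_closest_values find_closest_values find_closest_values_alt
  set vs := PySem.List.sorted values (fun x => x) false with hvs
  have hmono := pvSorted_mono values
  rw [← hvs] at hmono
  have hinv := pvBlGo_inv t vs hmono 0 vs.length (Nat.zero_le _) (le_refl _)
    (by intro i hi; omega) (by intro i h1 h2; omega)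
  obtain ⟨h1, h2, h3⟩ := hinv
  have hpw : vs.Pairwise (· ≤ ·) := by
    have := PySem.List.sorted_pairwise (xs := values) (key := fun x => x)
    simpa [hvs] using this
  calc pvAGo t vs 0 = pvAScan t vs := pvAGo_eq_scan t vs
    _ = pvCase t vs (pvBlGo t vs 0 vs.length) := pvScan_eq_case t vs hpw _ h1 h2 h3
    _ = _ := by simp [pvCase]
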